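-- pv_equiv track=rewrite | github.com/buulka/olymp_solutions | 16-17/5.py | func
-- ===== SOURCE A (Python) =====
-- def func(w):
--     s = 0
--     d = 0
--     a = 0
--     p = 1
--     while w > 0:
--         c = w % 10
--         k = c + a + d
--         s = s + (k % 10) * p
--         d = k // 10
--         a = c
--         p *= 10
--         w //= 10
--     s += (a + d) * p
--     return s
-- ===== SOURCE B (Python) =====
-- def func(w):
--     # The digit loop of A performs schoolbook addition of w and 10*w,
--     # i.e. it computes 11*w for positive w; for w <= 0 the loop never runs.
--     return 11 * w if w > 0 else 0
-- ===== Notes on version B (the rewrite author's own statement) =====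
-- stated objective: simpler
-- what changed: Replaced the digit-by-digit carry loop (which adds w and 10*w in base 10) by the closed form 11*w for w > 0 and 0 otherwise.
import Mathlib
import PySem

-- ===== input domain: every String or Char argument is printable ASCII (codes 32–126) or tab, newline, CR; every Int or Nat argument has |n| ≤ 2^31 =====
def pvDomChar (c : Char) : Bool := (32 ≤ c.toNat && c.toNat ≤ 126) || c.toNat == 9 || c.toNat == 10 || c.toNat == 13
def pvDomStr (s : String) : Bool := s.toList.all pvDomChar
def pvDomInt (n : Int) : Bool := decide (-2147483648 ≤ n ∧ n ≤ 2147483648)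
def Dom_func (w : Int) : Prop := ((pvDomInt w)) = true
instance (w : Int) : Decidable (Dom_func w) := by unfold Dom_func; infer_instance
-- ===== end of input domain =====

-- ===== PORT A =====
-- literal transliteration of A's while-loop, recursing on the current w
def funcLoop (w s d a p : Int) : Int :=
  if h : w > 0 then
    let c := PySem.Int.mod w 10
    let k := c + a + d
    funcLoop (PySem.Int.floordiv w 10) (s + (PySem.Int.mod k 10) * p)
      (PySem.Int.floordiv k 10) c (p * 10)
  else
    s + (a + d) * p
termination_by w.toNat
decreasing_by
  rw [PySem.Int.floordiv_eq_ediv_of_pos (by omega)]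
  omega

def func (w : Int) : Int := funcLoop w 0 0 0 1

-- ===== PORT B =====
def func_alt (w : Int) : Int := if w > 0 then 11 * w else 0

-- ===== PRECONDITION & SPEC =====
def Spec_func (w : Int) (out : Int) : Prop := out = func_alt w
instance (w : Int) (out : Int) : Decidable (Spec_func w out) := by unfold Spec_func; infer_instance

-- ===== CLAIM (what is proved, stated in full; the proofs are below) =====
def Claim_equal_func : Prop := ∀ (w : Int), Dom_func w → Spec_func w (func w)

-- ===== LEMMAS AND PROOFS =====

-- ===== VERDICT (by name: the statement is the Claim_ definition above) =====
-- loop invariant: for 0 ≤ w, funcLoop w s d a p = s + (a+d)*p + 11*w*p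
theorem funcLoop_eq : ∀ (n : Nat) (w : Int), 0 ≤ w → w.toNat ≤ n →
    ∀ s d a p : Int, funcLoop w s d a p = s + (a + d) * p + 11 * w * p := by
  intro n
  induction n with
  | zero =>
    intro w hw hn s d a p
    have hw0 : w = 0 := by omega
    rw [funcLoop]
    simp [hw0]
  | succ n ih =>
    intro w hw hn s d a p
    rw [funcLoop]
    split_ifs with h
    · have h10 : (0:Int) < 10 := by norm_num
      simp only [PySem.Int.floordiv_eq_ediv_of_pos h10, PySem.Int.mod_eq_emod_of_pos h10]
      rw [ih (w / 10) (by omega) (by omega)]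
      have key : (w % 10 + a + d) % 10 + (w % 10 + (w % 10 + a + d) / 10) * 10
          + 11 * (w / 10) * 10 = (a + d) + 11 * w := by omega
      linear_combination p * key
    · have hw0 : w = 0 := by omega
      subst hw0
      ring

theorem func_spec : Claim_equal_func := by
  intro w _
  unfold Spec_func func func_alt
  by_cases h : w > 0
  · rw [funcLoop_eq w.toNat w (by omega) (by omega)]
    simp [h]
  · rw [funcLoop]
    simp [h]
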